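-- pv_equiv track=rewrite | github.com/getsnaveen/Multilingual_VoiceOver | app/experiments/splitMerge.py | get_story_segments
-- ===== SOURCE A (Python) =====
-- from typing import List, Dict
--
-- def get_story_segments(song_segments: List[Dict], video_duration: str):
--     """
--     Derive story segments (everything between songs).
--     """
--     story_segments = []
--     prev_end = "00:00:00"
--
--     for seg in song_segments:
--         if prev_end != seg["start"]:
--             story_segments.append({"start": prev_end, "end": seg["start"]})
--         prev_end = seg["end"]
--
--     if prev_end != video_duration:
--         story_segments.append({"start": prev_end, "end": video_duration})
--
--     return story_segments
-- ===== SOURCE B (Python) =====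
-- def get_story_segments(song_segments, video_duration):
--     starts = ["00:00:00"] + [seg["end"] for seg in song_segments]
--     ends = [seg["start"] for seg in song_segments] + [video_duration]
--     return [{"start": a, "end": b} for a, b in zip(starts, ends) if a != b]
-- ===== Notes on version B (the rewrite author's own statement) =====
-- stated objective: simpler
-- what changed: Replaces the stateful prev_end loop with two shifted boundary lists (segment ends prefixed by 00:00:00, segment starts suffixed by video_duration) zipped positionally into gap dicts via a comprehension.
import Mathlib
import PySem

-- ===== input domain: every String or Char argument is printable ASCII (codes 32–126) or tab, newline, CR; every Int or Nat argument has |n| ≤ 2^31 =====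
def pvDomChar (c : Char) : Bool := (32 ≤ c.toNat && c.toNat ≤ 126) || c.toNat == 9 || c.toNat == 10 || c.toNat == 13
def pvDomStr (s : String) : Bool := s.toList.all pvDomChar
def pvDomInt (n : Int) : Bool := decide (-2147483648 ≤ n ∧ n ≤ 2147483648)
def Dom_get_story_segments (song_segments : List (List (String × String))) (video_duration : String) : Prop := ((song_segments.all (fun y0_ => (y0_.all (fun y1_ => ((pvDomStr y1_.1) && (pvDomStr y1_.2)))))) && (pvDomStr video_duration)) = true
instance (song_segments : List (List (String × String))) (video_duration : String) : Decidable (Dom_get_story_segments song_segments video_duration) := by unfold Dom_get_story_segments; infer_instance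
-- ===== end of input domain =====

-- B replaces A's stateful prev_end loop by two shifted boundary lists zipped positionally (objective: simpler).

-- first-match lookup of key k in an association-list dict (Python seg[k]); none = KeyError
def pvLookup (seg : List (String × String)) (k : String) : Option String :=
  (seg.find? (fun p => p.1 == k)).map (·.2)

-- ===== PORT A =====
def get_story_segments (song_segments : List (List (String × String))) (video_duration : String) : List (List (String × String)) :=
  let st := song_segments.foldl
    (fun (st : List (List (String × String)) × String) seg =>
      let s := (pvLookup seg "start").getD ""   -- KeyError excluded by Pre_
      let e := (pvLookup seg "end").getD ""
      let story := if st.2 ≠ s then st.1 ++ [[("start", st.2), ("end", s)]] else st.1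
      (story, e))
    ([], "00:00:00")
  if st.2 ≠ video_duration then st.1 ++ [[("start", st.2), ("end", video_duration)]] else st.1

-- ===== PORT B =====
def get_story_segments_alt (song_segments : List (List (String × String))) (video_duration : String) : List (List (String × String)) :=
  let starts := "00:00:00" :: song_segments.map (fun seg => (pvLookup seg "end").getD "")
  let ends := song_segments.map (fun seg => (pvLookup seg "start").getD "") ++ [video_duration]
  (starts.zip ends).filterMap (fun p => if p.1 ≠ p.2 then some [("start", p.1), ("end", p.2)] else none)

-- ===== PRECONDITION & SPEC =====
-- Pre_: every segment dict carries both keys "start" and "end"; otherwise Python A raises KeyError.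
def Pre_get_story_segments (song_segments : List (List (String × String))) (video_duration : String) : Prop :=
  ∀ seg ∈ song_segments, (pvLookup seg "start").isSome ∧ (pvLookup seg "end").isSome
instance (song_segments : List (List (String × String))) (video_duration : String) : Decidable (Pre_get_story_segments song_segments video_duration) := by unfold Pre_get_story_segments; infer_instance

def pvWitness_get_story_segments : (List (List (String × String))) × String :=
  ([[("start", "00:00:05"), ("end", "00:00:10")]], "00:00:20")

def Spec_get_story_segments (song_segments : List (List (String × String))) (video_duration : String) (out : List (List (String × String))) : Prop := out = get_story_segments_alt song_segments video_duration
instance (song_segments : List (List (String × String))) (video_duration : String) (out : List (List (String × String))) : Decidable (Spec_get_story_segments song_segments video_duration out) := by unfold Spec_get_story_segments; infer_instance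

-- ===== CLAIM (what is proved, stated in full; the proofs are below) =====
def Claim_equal_get_story_segments : Prop := ∀ (song_segments : List (List (String × String))) (video_duration : String), Dom_get_story_segments song_segments video_duration → Pre_get_story_segments song_segments video_duration → Spec_get_story_segments song_segments video_duration (get_story_segments song_segments video_duration)

-- ===== LEMMAS AND PROOFS =====

-- the loop of A, with the accumulator and prev_end made explicit, equals B's zip of shifted boundary lists
theorem loop_eq_zip (segs : List (List (String × String))) (acc : List (List (String × String)))
    (prev dur : String) :
    (let st := segs.foldl
        (fun (st : List (List (String × String)) × String) seg =>
          let s := (pvLookup seg "start").getD ""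
          let e := (pvLookup seg "end").getD ""
          let story := if st.2 ≠ s then st.1 ++ [[("start", st.2), ("end", s)]] else st.1
          (story, e))
        (acc, prev)
      if st.2 ≠ dur then st.1 ++ [[("start", st.2), ("end", dur)]] else st.1)
    = acc ++ ((prev :: segs.map (fun seg => (pvLookup seg "end").getD "")).zip
        (segs.map (fun seg => (pvLookup seg "start").getD "") ++ [dur])).filterMap
        (fun p => if p.1 ≠ p.2 then some [("start", p.1), ("end", p.2)] else none) := by
  induction segs generalizing acc prev with
  | nil =>
    simp only [List.foldl_nil, List.map_nil, List.nil_append, List.zip_cons_cons,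
      List.zip_nil_left, List.filterMap_cons, List.filterMap_nil]
    split_ifs <;> simp
  | cons seg rest ih =>
    simp only [List.foldl_cons, List.map_cons, List.cons_append, List.zip_cons_cons,
      List.filterMap_cons]
    rw [ih]
    split_ifs <;> simp

-- ===== VERDICT (by name: the statement is the Claim_ definition above) =====
theorem get_story_segments_spec : Claim_equal_get_story_segments := by
  intro segs dur _ _
  unfold Spec_get_story_segments
  have h := loop_eq_zip segs [] "00:00:00" dur
  simpa [get_story_segments, get_story_segments_alt] using h
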